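-- pv_equiv track=rewrite | github.com/amireslami818/finished6-8-25 | step2.py | filter_odds_by_minutes
-- ===== SOURCE A (Python) =====
-- def filter_odds_by_minutes(odds_data, min_minute=2, max_minute=6):
--     """
--     Filter odds arrays to only keep entries where the minute field (second field)
--     is between min_minute and max_minute (inclusive).
--     For multiple entries in the same minute, keep only the last one (highest timestamp).
--
--     Args:
--         odds_data: The odds data structure (dict with money_line, spread, over_under, corners arrays(dict with asia, bs, eu, cr arrays))
--         min_minute: Minimum minute value to keep (as integer)
--         max_minute: Maximum minute value to keep (as integer)
--
--     Returns:
--         Filtered odds data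
--     """
--     filtered_odds = {}
--
--     for odds_type in ['money_line', 'spread', 'over_under', 'corners']:
--         if odds_type in odds_data:
--             # First, collect all valid entries grouped by minute
--             minute_entries = {}
--
--             for array in odds_data[odds_type]:
--                 # Check if the array has at least 2 elements and the second element is the minute field
--                 if len(array) >= 2:
--                     minute_field = array[1]  # Get the minute field
--
--                     # Convert to integer for numeric comparison
--                     try:
--                         minute_num = int(minute_field) if minute_field != "" else -1
--
--                         # Only keep if minute field is between min and max (inclusive)
--                         if min_minute <= minute_num <= max_minute:
--                             # Group by minute, keeping track of timestamp
--                             if minute_num not in minute_entries: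
--                                 minute_entries[minute_num] = []
--                             minute_entries[minute_num].append(array)
--                     except (ValueError, TypeError):
--                         # Skip entries that can't be converted to int
--                         pass
--
--             # Now keep only the last entry (highest timestamp) for each minute
--             filtered_arrays = []
--             for minute in sorted(minute_entries.keys()):
--                 # Sort by timestamp (first element) and take the last one
--                 entries_for_minute = sorted(minute_entries[minute], key=lambda x: x[0])
--                 filtered_arrays.append(entries_for_minute[-1])  # Take the last (highest timestamp)
--
--             filtered_odds[odds_type] = filtered_arrays
--
--     return filtered_odds
-- ===== SOURCE B (Python) =====
-- def filter_odds_by_minutes(odds_data, min_minute=2, max_minute=6):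
--     """Same result by a different decomposition: instead of grouping all
--     entries per minute into lists and stably sorting each group by timestamp,
--     keep one running best entry per minute (replace on timestamp >=, so ties
--     resolve to the later entry), then emit the bests in ascending minute order."""
--     filtered_odds = {}
--     for odds_type in ['money_line', 'spread', 'over_under', 'corners']:
--         if odds_type in odds_data:
--             best = {}
--             for array in odds_data[odds_type]:
--                 if len(array) >= 2:
--                     minute_field = array[1]
--                     try:
--                         minute_num = int(minute_field) if minute_field != "" else -1
--                     except (ValueError, TypeError):
--                         continue
--                     if min_minute <= minute_num <= max_minute:
--                         if minute_num not in best or best[minute_num][0] <= array[0]: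
--                             best[minute_num] = array
--             filtered_odds[odds_type] = [best[m] for m in sorted(best)]
--     return filtered_odds
-- ===== Notes on version B (the rewrite author's own statement) =====
-- stated objective: alternative
-- what changed: Replaces A's dict-of-lists grouping plus a full stable sort of every minute-group (taking its last element) by a single pass that keeps one running best entry per minute (replace when the new timestamp is >= the stored one, so ties resolve to the later entry), then emits the bests in ascending minute order.
import Mathlib
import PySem

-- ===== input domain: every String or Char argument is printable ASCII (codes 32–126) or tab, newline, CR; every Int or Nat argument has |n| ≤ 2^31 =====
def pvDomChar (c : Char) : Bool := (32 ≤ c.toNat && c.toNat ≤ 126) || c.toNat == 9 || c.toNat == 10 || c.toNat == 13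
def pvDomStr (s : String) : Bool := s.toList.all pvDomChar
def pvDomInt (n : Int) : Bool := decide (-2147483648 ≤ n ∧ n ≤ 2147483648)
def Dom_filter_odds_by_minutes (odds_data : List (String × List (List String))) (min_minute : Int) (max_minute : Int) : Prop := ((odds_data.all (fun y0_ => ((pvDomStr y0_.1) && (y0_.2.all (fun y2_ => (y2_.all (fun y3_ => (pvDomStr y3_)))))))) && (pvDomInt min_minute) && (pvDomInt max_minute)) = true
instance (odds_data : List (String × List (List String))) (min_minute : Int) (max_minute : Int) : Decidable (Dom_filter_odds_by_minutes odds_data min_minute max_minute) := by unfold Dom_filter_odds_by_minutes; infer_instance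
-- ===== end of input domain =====

-- B keeps a running best entry per minute instead of A's group-then-sort per minute; objective: alternative decomposition.

-- shared accessor: array[0] (both Pythons read the timestamp field this way; only used on
-- non-empty arrays — the len(array) >= 2 guard — where pyGet? returns some, so `.getD ""` is exact)
def pvTs (x : List String) : String := (PySem.List.pyGet? x 0).getD ""

-- the guard/conversion block that appears verbatim in BOTH Pythons:
-- len(array) >= 2; minute_field = array[1]; minute_num = int(minute_field) if minute_field != "" else -1
-- (ValueError -> skip); keep iff min_minute <= minute_num <= max_minute
def pvMinuteOf (min_minute max_minute : Int) (array : List String) : Option Int :=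
  if 2 ≤ array.length then
    -- array[1]: in range because of the length guard, so `.getD ""` is exact
    let minute_field := (PySem.List.pyGet? array 1).getD ""
    match (if minute_field ≠ "" then PySem.Int.ofStr? minute_field else some (-1)) with
    | some minute_num =>
        if min_minute ≤ minute_num ∧ minute_num ≤ max_minute then some minute_num else none
    | none => none
  else none

-- ===== PORT A =====
-- inner loop body of A: group the accepted entry under its minute
-- ("if minute_num not in minute_entries: … = []; ….append(array)" is Dict.modify with default [])
def pvStepA (min_minute max_minute : Int) (me : PySem.Dict Int (List (List String))) (array : List String) : PySem.Dict Int (List (List String)) :=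
  match pvMinuteOf min_minute max_minute array with
  | some minute_num => me.modify minute_num [] (· ++ [array])
  | none => me

-- A's second loop: for minute in sorted(keys): sort the group by timestamp, append its last ([-1]) element
-- (the group list is non-empty for every key, so the `.getD []` after [-1] is exact)
def pvEmitA (me : PySem.Dict Int (List (List String))) : List (List String) :=
  (PySem.List.sorted me.keys (fun k => k) false).foldl
    (fun acc minute =>
      acc ++ [(PySem.List.pyGet? (PySem.List.sorted (me.getD minute []) pvTs false) (-1)).getD []])
    []

-- the four keys written to filtered_odds are distinct and fresh, so each dict assignment appends
def filter_odds_by_minutes (odds_data : List (String × List (List String))) (min_minute : Int) (max_minute : Int) : List (String × List (List String)) :=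
  (["money_line", "spread", "over_under", "corners"]).foldl
    (fun filtered odds_type =>
      match PySem.Dict.get? (PySem.Dict.mk odds_data) odds_type with
      | some arrays =>
          filtered ++ [(odds_type, pvEmitA (arrays.foldl (pvStepA min_minute max_minute) PySem.Dict.empty))]
      | none => filtered)
    []

-- ===== PORT B =====
-- B's single pass: "if minute_num not in best or best[minute_num][0] <= array[0]: best[minute_num] = array"
def pvStepB (min_minute max_minute : Int) (best : PySem.Dict Int (List String)) (array : List String) : PySem.Dict Int (List String) :=
  match pvMinuteOf min_minute max_minute array with
  | some minute_num =>
      if !best.contains minute_num || decide (pvTs (best.getD minute_num []) ≤ pvTs array) then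
        best.insert minute_num array
      else best
  | none => best

-- "[best[m] for m in sorted(best)]" (m ∈ keys, so getD is exact)
def filter_odds_by_minutes_alt (odds_data : List (String × List (List String))) (min_minute : Int) (max_minute : Int) : List (String × List (List String)) :=
  (["money_line", "spread", "over_under", "corners"]).foldl
    (fun filtered odds_type =>
      match PySem.Dict.get? (PySem.Dict.mk odds_data) odds_type with
      | some arrays =>
          let best := arrays.foldl (pvStepB min_minute max_minute) PySem.Dict.empty
          filtered ++ [(odds_type, (PySem.List.sorted best.keys (fun k => k) false).map (fun m => best.getD m []))]
      | none => filtered)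
    []

-- ===== PRECONDITION & SPEC =====
def Spec_filter_odds_by_minutes (odds_data : List (String × List (List String))) (min_minute : Int) (max_minute : Int) (out : List (String × List (List String))) : Prop := out = filter_odds_by_minutes_alt odds_data min_minute max_minute
instance (odds_data : List (String × List (List String))) (min_minute : Int) (max_minute : Int) (out : List (String × List (List String))) : Decidable (Spec_filter_odds_by_minutes odds_data min_minute max_minute out) := by unfold Spec_filter_odds_by_minutes; infer_instance

-- ===== CLAIM (what is proved, stated in full; the proofs are below) =====
def Claim_equal_filter_odds_by_minutes : Prop := ∀ (odds_data : List (String × List (List String))) (min_minute : Int) (max_minute : Int), Dom_filter_odds_by_minutes odds_data min_minute max_minute → Spec_filter_odds_by_minutes odds_data min_minute max_minute (filter_odds_by_minutes odds_data min_minute max_minute)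

-- ===== LEMMAS AND PROOFS =====

-- one step of the running maximum B maintains (ties replaced, i.e. last maximum wins)
def pvRunStep (acc : Option (List String)) (x : List String) : Option (List String) :=
  some (match acc with | none => x | some c => if pvTs c ≤ pvTs x then x else c)

-- xs[-1] is the last element
theorem pvGet_neg_one {α : Type} (l : List α) : PySem.List.pyGet? l (-1) = l.getLast? := by
  cases l with
  | nil => rfl
  | cons x t =>
      simp [PySem.List.pyGet?, PySem.List.pyIdx?, List.getLast?_eq_getElem?]

theorem pvGetLast?_cons_ne {α : Type} (y : α) (l : List α) (h : l ≠ []) :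
    (y :: l).getLast? = l.getLast? := by
  cases l with
  | nil => exact absurd rfl h
  | cons a t => simp [List.getLast?_cons_cons]

-- last element after a stable insertion into a timestamp-sorted list = one running-max step
theorem pvLast_insertBy (x : List String) (ys : List (List String))
    (h : ys.Pairwise (fun a b => pvTs a ≤ pvTs b)) :
    (PySem.List.insertBy (fun a b => decide (pvTs a < pvTs b)) x ys).getLast? = pvRunStep ys.getLast? x := by
  induction ys with
  | nil => rfl
  | cons y t ih =>
      rw [List.pairwise_cons] at h
      simp only [PySem.List.insertBy]
      split
      · -- x goes in front: pvTs x < pvTs y ≤ pvTs (last)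
        rename_i hlt
        rw [decide_eq_true_iff] at hlt
        have hz : (y :: t).getLast? = some ((y :: t).getLast (by simp)) := List.getLast?_eq_some_getLast _
        have hmem : (y :: t).getLast (by simp) ∈ y :: t := List.getLast_mem _
        have hyz : pvTs y ≤ pvTs ((y :: t).getLast (by simp)) := by
          rcases List.mem_cons.mp hmem with h1 | h1
          · rw [h1]
          · exact h.1 _ h1
        rw [pvGetLast?_cons_ne x (y :: t) (by simp), hz]
        simp only [pvRunStep]
        rw [if_neg (by intro hc; exact absurd (lt_of_lt_of_le hlt hyz) (not_lt.mpr hc))]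
      · -- y stays in front: pvTs y ≤ pvTs x
        rename_i hge
        rw [decide_eq_true_iff] at hge
        rw [not_lt] at hge
        have hne : PySem.List.insertBy (fun a b => decide (pvTs a < pvTs b)) x t ≠ [] :=
          List.ne_nil_of_mem ((PySem.List.mem_insertBy _ x x t).mpr (Or.inl rfl))
        rw [pvGetLast?_cons_ne y _ hne, ih h.2]
        cases t with
        | nil => simp only [pvRunStep, List.getLast?_nil, List.getLast?_singleton, if_pos hge]
        | cons z t' => rw [pvGetLast?_cons_ne y (z :: t') (by simp)]

-- the last element of the stable sort by timestamp IS the left fold of the running max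
theorem pvLast_sorted (l : List (List String)) :
    (PySem.List.sorted l pvTs false).getLast? = l.foldl pvRunStep none := by
  induction l using List.reverseRecOn with
  | nil => rfl
  | append_singleton t x ih =>
      rw [PySem.List.sorted_eq_foldl_insertBy, List.foldl_append, List.foldl_append]
      simp only [List.foldl_cons, List.foldl_nil]
      rw [← PySem.List.sorted_eq_foldl_insertBy,
          pvLast_insertBy x _ (PySem.List.sorted_pairwise t pvTs), ih]

-- the invariant tying A's group dict to B's best dict after any prefix of the input
def pvInv (d : PySem.Dict Int (List (List String))) (b : PySem.Dict Int (List String)) : Prop :=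
  d.keys = b.keys ∧ ∀ m : Int, b.get? m = (d.getD m []).foldl pvRunStep none

theorem pvStep_inv (mn mx : Int) (a : List String) (d : PySem.Dict Int (List (List String)))
    (b : PySem.Dict Int (List String)) (h : pvInv d b) :
    pvInv (pvStepA mn mx d a) (pvStepB mn mx b a) := by
  unfold pvStepA pvStepB
  cases hmo : pvMinuteOf mn mx a with
  | none => simp only [hmo]; exact h
  | some k =>
      simp only [hmo]
      obtain ⟨hk, hg⟩ := h
      have hcont : d.contains k = b.contains k := by
        rw [PySem.Dict.contains_eq_decide_mem_keys, PySem.Dict.contains_eq_decide_mem_keys, hk]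
      constructor
      · -- keys stay equal
        rw [PySem.Dict.keys_modify]
        cases hc : b.contains k with
        | false =>
            simp only [hc, Bool.not_false, Bool.true_or, if_true]
            rw [PySem.Dict.keys_insert_of_not_contains _ _ (hcont.trans hc),
                PySem.Dict.keys_insert_of_not_contains _ _ hc, hk]
        | true =>
            rw [PySem.Dict.keys_insert_of_contains _ _ (hcont.trans hc), hk]
            split
            · rw [PySem.Dict.keys_insert_of_contains _ _ hc]
            · rfl
      · -- each minute's best is the running max of its group
        intro m
        by_cases hm : m = k
        · subst hm
          rw [PySem.Dict.getD_modify_self, List.foldl_append, List.foldl_cons, List.foldl_nil, ← hg]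
          cases hc : b.contains m with
          | false =>
              have hnone : b.get? m = none := by
                have := PySem.Dict.contains_eq_isSome_get? b m
                rw [hc] at this
                exact Option.not_isSome_iff_eq_none.mp (by rw [← this]; simp)
              simp only [hc, Bool.not_false, Bool.true_or, if_true]
              rw [PySem.Dict.get?_insert_self, hnone]
              rfl
          | true =>
              obtain ⟨cur, hcur⟩ : ∃ v, b.get? m = some v := by
                have := PySem.Dict.contains_eq_isSome_get? b m
                rw [hc] at this
                exact Option.isSome_iff_exists.mp this.symm
              have hgd : b.getD m [] = cur := PySem.Dict.getD_of_get?_eq_some b [] hcur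
              simp only [hc, Bool.not_true, Bool.false_or, hgd, hcur, pvRunStep]
              by_cases hle : pvTs cur ≤ pvTs a
              · rw [if_pos (decide_eq_true hle), PySem.Dict.get?_insert_self, if_pos hle]
              · rw [if_neg (by simpa using hle), hcur, if_neg hle]
        · have hA : (d.modify k [] (· ++ [a])).getD m [] = d.getD m [] :=
            PySem.Dict.getD_modify_of_ne d [] _ hm
          rw [hA, ← hg m]
          split
          · exact PySem.Dict.get?_insert_of_ne b a hm
          · rfl

theorem pvFold_inv (mn mx : Int) (l : List (List String)) (d : PySem.Dict Int (List (List String)))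
    (b : PySem.Dict Int (List String)) (h : pvInv d b) :
    pvInv (l.foldl (pvStepA mn mx) d) (l.foldl (pvStepB mn mx) b) := by
  induction l generalizing d b with
  | nil => exact h
  | cons x t ih => exact ih _ _ (pvStep_inv mn mx x d b h)

theorem pvEmit_eq (d : PySem.Dict Int (List (List String))) (b : PySem.Dict Int (List String))
    (h : pvInv d b) :
    pvEmitA d = (PySem.List.sorted b.keys (fun k => k) false).map (fun m => b.getD m []) := by
  unfold pvEmitA
  rw [PySem.List.foldl_append_singleton_eq_map, List.nil_append, h.1]
  refine List.map_congr_left (fun m _ => ?_)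
  rw [pvGet_neg_one, pvLast_sorted, ← h.2, PySem.Dict.getD_eq_get?_getD]

-- ===== VERDICT (by name: the statement is the Claim_ definition above) =====
theorem filter_odds_by_minutes_spec : Claim_equal_filter_odds_by_minutes := by
  intro od mn mx _
  unfold Spec_filter_odds_by_minutes filter_odds_by_minutes filter_odds_by_minutes_alt
  refine PySem.List.foldl_congr_mem _ _ _ _ (fun acc t _ => ?_)
  cases PySem.Dict.get? (PySem.Dict.mk od) t with
  | none => rfl
  | some arrays =>
      have hinv : pvInv (arrays.foldl (pvStepA mn mx) PySem.Dict.empty)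
          (arrays.foldl (pvStepB mn mx) PySem.Dict.empty) := by
        refine pvFold_inv mn mx arrays _ _ ⟨rfl, fun m => ?_⟩
        simp [PySem.Dict.get?_empty, PySem.Dict.getD_empty]
      simpa using congrArg (fun z => acc ++ [(t, z)]) (pvEmit_eq _ _ hinv)
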